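-- pv_equiv track=rewrite | github.com/Coke-Eating-Polarbear/baekjoon_programmers | 프로그래머스/0/120904. 숫자 찾기/숫자 찾기.py | solution
-- ===== SOURCE A (Python) =====
-- def solution(num, k):
--     answer = -1
--     index = 0
--     array=[]
--     while(1):
--         array.append(num%10)
--         if(num<10):
--             break;
--         num = num //10
--         index = index + 1
--     array = list(reversed(array))
--     temp = 1
--     for index, value in enumerate(array, start=1):
--         if value == k:
--             return index
--     return answer
-- ===== SOURCE B (Python) =====
-- def solution(num, k):
--     # Scan the decimal string of num for the digit k; a k outside 0..9 is not a digit.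
--     pos = str(num).find(str(k)) if 0 <= k <= 9 else -1
--     return pos + 1 if pos != -1 else -1
-- ===== Notes on version B (the rewrite author's own statement) =====
-- stated objective: simpler
-- what changed: B replaces A's modulo digit-extraction loop, list reversal and enumerate scan by a single str.find on the decimal string; Pre_ excludes negative num, a corner outside the problem's nonnegative domain where A's digit loop keeps only Python's num % 10 while B scans the signed string, so neither value is specified.
-- outside the precondition, e.g. on solution(-5, 5): A returns 1, B returns 2
import Mathlib
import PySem

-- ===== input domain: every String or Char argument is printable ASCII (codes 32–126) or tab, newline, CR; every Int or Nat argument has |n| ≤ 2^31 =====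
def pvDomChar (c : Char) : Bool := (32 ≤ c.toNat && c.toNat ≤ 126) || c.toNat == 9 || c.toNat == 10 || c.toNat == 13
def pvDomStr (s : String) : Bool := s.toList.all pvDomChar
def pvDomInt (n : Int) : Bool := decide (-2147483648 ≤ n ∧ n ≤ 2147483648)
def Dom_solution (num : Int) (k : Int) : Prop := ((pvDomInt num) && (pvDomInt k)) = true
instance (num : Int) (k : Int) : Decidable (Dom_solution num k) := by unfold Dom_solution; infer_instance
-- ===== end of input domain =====

-- B replaces A's modulo digit-list build + reversal + enumerate scan by a single
-- string .find on the decimal representation (simpler, same cost); Pre_ restricts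
-- to the problem's nonnegative domain.

-- ===== PORT A =====
-- the while(1) loop: append num % 10, stop when num < 10, else num //= 10
def solLoop (num : Int) (array : List Int) : List Int :=
  let array2 := array ++ [PySem.Int.mod num 10]
  if num < 10 then array2
  else solLoop (PySem.Int.floordiv num 10) array2
termination_by num.toNat
decreasing_by
  first
  | omega
  | · rw [PySem.Int.floordiv_eq_ediv_of_pos (by omega : (0:Int) < 10)]
      omega

-- for index, value in enumerate(array, start=1): if value == k: return index
def solScan (array : List Int) (k : Int) (index : Int) : Int :=
  match array with
  | [] => -1
  | value :: rest => if value == k then index else solScan rest k (index + 1)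

def solution (num : Int) (k : Int) : Int :=
  solScan (solLoop num []).reverse k 1

-- ===== PORT B =====
def solution_alt (num : Int) (k : Int) : Int :=
  let pos := if 0 ≤ k ∧ k ≤ 9 then PySem.Str.find (PySem.Int.toStr num) (PySem.Int.toStr k) else -1
  if pos ≠ -1 then pos + 1 else -1

-- ===== PRECONDITION & SPEC =====
-- Pre_ excludes negative num, a corner outside the problem's nonnegative domain where
-- A's digit loop keeps only Python's num % 10 while B scans the signed decimal string,
-- so neither value is specified.
def Pre_solution (num : Int) (k : Int) : Prop := 0 ≤ num
instance (num : Int) (k : Int) : Decidable (Pre_solution num k) := by unfold Pre_solution; infer_instance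
def pvWitness_solution : Int × Int := (103, 0)
def Spec_solution (num : Int) (k : Int) (out : Int) : Prop := out = solution_alt num k
instance (num : Int) (k : Int) (out : Int) : Decidable (Spec_solution num k out) := by unfold Spec_solution; infer_instance

-- ===== CLAIM (what is proved, stated in full; the proofs are below) =====
def Claim_equal_solution : Prop := ∀ (num : Int) (k : Int), Dom_solution num k → Pre_solution num k → Spec_solution num k (solution num k)

-- ===== LEMMAS AND PROOFS =====

-- A's digit list (most significant first) as a direct recursion
def msd (n : Int) : List Int :=
  if n < 10 then [PySem.Int.mod n 10]
  else msd (PySem.Int.floordiv n 10) ++ [PySem.Int.mod n 10]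
termination_by n.toNat
decreasing_by
  first
  | omega
  | · rw [PySem.Int.floordiv_eq_ediv_of_pos (by omega : (0:Int) < 10)]
      omega

theorem solLoop_eq (n : Int) (acc : List Int) : solLoop n acc = acc ++ (msd n).reverse := by
  by_cases h : n < 10
  · rw [solLoop, msd]; simp [h]
  · rw [solLoop, msd]
    simp only [h, ite_false]
    rw [solLoop_eq]
    · simp
termination_by n.toNat
decreasing_by
  first
  | omega
  | · rw [PySem.Int.floordiv_eq_ediv_of_pos (by omega : (0:Int) < 10)]
      omega

theorem msd_bound (n : Int) : ∀ d ∈ msd n, 0 ≤ d ∧ d < 10 := by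
  rw [msd]
  by_cases h : n < 10
  · simp [h]
    omega
  · simp [h]
    intro d hd
    rcases hd with hd | hd
    · exact msd_bound _ d hd
    · subst hd
      omega
termination_by n.toNat
decreasing_by
  omega

theorem solScan_notfound (D : List Int) (k : Int) (h : ∀ d ∈ D, d ≠ k) :
    ∀ i : Int, solScan D k i = -1 := by
  induction D with
  | nil => intro i; rfl
  | cons v rest ih =>
    intro i
    rw [solScan]
    have hv : v ≠ k := h v (by simp)
    simp [hv]
    exact ih (fun d hd => h d (by simp [hd])) _

def dchar (d : Int) : Char := Nat.digitChar d.toNat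

theorem dchar_inj (v k : Int) (hv : 0 ≤ v ∧ v < 10) (hk : 0 ≤ k ∧ k ≤ 9) :
    dchar v = dchar k ↔ v = k := by
  obtain ⟨hv0, hv1⟩ := hv
  obtain ⟨hk0, hk1⟩ := hk
  interval_cases v <;> interval_cases k <;> simp [dchar] <;> decide

theorem toDigitsCore_eq (fuel : Nat) : ∀ (n : Nat) (acc : List Char), n < fuel →
    Nat.toDigitsCore 10 fuel n acc = (msd (n : Int)).map dchar ++ acc := by
  induction fuel with
  | zero => intro n acc h; omega
  | succ f ih =>
    intro n acc h
    rw [Nat.toDigitsCore]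
    have hfd : PySem.Int.floordiv (n : Int) 10 = ((n / 10 : Nat) : Int) := by
      rw [PySem.Int.floordiv_eq_ediv_of_pos (by omega : (0:Int) < 10)]
      exact (Int.natCast_div n 10).symm
    have hmd : PySem.Int.mod (n : Int) 10 = ((n % 10 : Nat) : Int) := by
      rw [PySem.Int.mod_eq_emod_of_pos (by omega : (0:Int) < 10)]
      exact (Int.natCast_mod n 10).symm
    by_cases h0 : n / 10 = 0
    · simp only [h0, if_pos]
      rw [msd]
      have hn : (n : Int) < 10 := by omega
      simp only [hn, if_pos, List.map_cons, List.map_nil]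
      rw [hmd]
      have hnn : n % 10 = n := by omega
      simp [dchar, hnn]
    · simp only [h0, ite_false]
      rw [msd]
      have hn : ¬ ((n : Int) < 10) := by omega
      simp only [hn, ite_false, List.map_append, List.map_cons, List.map_nil]
      rw [hfd, hmd]
      rw [ih (n / 10) _ (by omega)]
      simp [dchar]
      congr 1

theorem toChars_msd (m : Int) (hm : 0 ≤ m) :
    PySem.Int.toChars m = (msd m).map dchar := by
  have hneg : ¬ (m < 0) := by omega
  rw [PySem.Int.toChars]
  simp only [hneg, ite_false]
  rw [Nat.toDigits]
  rw [toDigitsCore_eq (m.toNat + 1) m.toNat [] (by omega)]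
  rw [Int.toNat_of_nonneg hm]
  simp

theorem toChars_digit (k : Int) (hk : 0 ≤ k ∧ k ≤ 9) :
    PySem.Int.toChars k = [dchar k] := by
  obtain ⟨hk0, hk1⟩ := hk
  interval_cases k <;> decide

theorem find_go_eq (D : List Int) (k : Int) (hk : 0 ≤ k ∧ k ≤ 9)
    (hD : ∀ d ∈ D, 0 ≤ d ∧ d < 10) : ∀ j : Nat,
    solScan D k ((j : Int) + 1) =
      (if PySem.Chars.find.go [dchar k] (D.map dchar) j ≠ -1
       then PySem.Chars.find.go [dchar k] (D.map dchar) j + 1 else -1) := by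
  induction D with
  | nil => intro j; simp [solScan, PySem.Chars.find.go, List.isEmpty]
  | cons v rest ih =>
    intro j
    rw [solScan]
    simp only [List.map_cons]
    rw [PySem.Chars.find.go]
    have hpref : List.isPrefixOf [dchar k] (dchar v :: rest.map dchar) = (dchar k == dchar v) := by
      simp [List.isPrefixOf]
    rw [hpref]
    by_cases hv : v = k
    · have : dchar k = dchar v := by rw [hv]
      simp only [hv, beq_self_eq_true, if_pos, this]
      simp
    · have hdv : dchar k ≠ dchar v := by
        intro hc
        exact hv (((dchar_inj v k (hD v (by simp)) hk).mp hc.symm))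
      have hb : (dchar k == dchar v) = false := by simp [hdv]
      have hbv : (v == k) = false := by simp [hv]
      rw [hb, hbv]
      simp only [Bool.false_eq_true, ite_false]
      have := ih (fun d hd => hD d (by simp [hd])) (j + 1)
      rw [show ((j : Int) + 1 + 1) = (((j + 1 : Nat) : Int) + 1) by push_cast; ring]
      exact this

theorem solution_eq (num k : Int) (hnum : 0 ≤ num) : solution num k = solution_alt num k := by
  have harr : (solLoop num []).reverse = msd num := by
    rw [solLoop_eq]; simp
  by_cases hk : 0 ≤ k ∧ k ≤ 9
  · rw [solution, solution_alt]
    simp only [hk, if_pos]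
    rw [harr]
    simp only [PySem.Str.find_eq, PySem.Int.toList_toStr]
    rw [toChars_msd _ hnum, toChars_digit k hk]
    rw [PySem.Chars.find]
    have := find_go_eq (msd num) k hk (msd_bound num) 0
    simpa using this
  · rw [solution, solution_alt]
    simp only [hk, ite_false]
    rw [harr]
    simp only [ne_eq, neg_neg, not_true_eq_false, ite_false]
    apply solScan_notfound
    intro d hd
    have := msd_bound num d hd
    omega

-- ===== VERDICT (by name: the statement is the Claim_ definition above) =====
theorem solution_spec : Claim_equal_solution := by
  intro num k _ hpre
  unfold Spec_solution
  exact solution_eq num k hpre
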